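-- pv_equiv track=rewrite | github.com/Dhrumil-Zion/Competitive-Programming-Basics | Codechef/LET'S CODE DSC GGV/Good Son !!.py | goodson
-- ===== SOURCE A (Python) =====
-- def goodson(s):
--     n = len(s)
--     arr = [0]*(n+1)
--     for i in range(n):
--         if s[i] == '<':
--             arr[i+1] = arr[i]+1
--
--     for i in reversed(range(n)):
--         if s[i] == '>':
--             arr[i] = max(arr[i+1]+1, arr[i])
--     return sum(arr)
-- ===== SOURCE B (Python) =====
-- def goodson(s):
--     # single run-length pass: sum each mountain (ascent a, descent b) in closed form
--     total = 0
--     a = 0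
--     b = 0
--     for c in s:
--         if c == '<':
--             if b:
--                 total += a*(a-1)//2 + b*(b-1)//2 + max(a, b)
--                 a = 0
--                 b = 0
--             a += 1
--         elif c == '>':
--             b += 1
--         else:
--             total += a*(a-1)//2 + b*(b-1)//2 + max(a, b)
--             a = 0
--             b = 0
--     return total + a*(a-1)//2 + b*(b-1)//2 + max(a, b)
-- ===== Notes on version B (the rewrite author's own statement) =====
-- stated objective: alternative
-- what changed: Replaces the two-pass auxiliary-array candy computation by a single run-length scan that keeps only the current ascent/descent lengths and adds each mountain's closed-form sum a*(a-1)//2 + b*(b-1)//2 + max(a,b); it trades the O(n) auxiliary array for O(1) state at similar cost.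
import Mathlib
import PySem

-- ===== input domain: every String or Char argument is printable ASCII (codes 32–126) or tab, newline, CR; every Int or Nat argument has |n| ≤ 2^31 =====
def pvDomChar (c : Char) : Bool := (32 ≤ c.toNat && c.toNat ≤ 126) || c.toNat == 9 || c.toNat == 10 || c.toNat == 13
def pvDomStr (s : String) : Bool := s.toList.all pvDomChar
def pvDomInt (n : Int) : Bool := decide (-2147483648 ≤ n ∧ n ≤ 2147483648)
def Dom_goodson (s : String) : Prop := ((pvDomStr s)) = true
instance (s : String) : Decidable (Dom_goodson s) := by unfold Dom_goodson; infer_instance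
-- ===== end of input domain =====

-- B (objective: alternative) replaces A's two-pass auxiliary-array candy computation by a single
-- run-length scan that adds each mountain (ascent a, descent b) in closed form; return values are proved equal.

-- ===== PORT A =====
-- A-side helpers: the two loop bodies of A (indices are always in range, so List.getD is exact here).
def stepFwdA (cs : List Char) (arr : List Int) (i : Nat) : List Int :=
  if cs.getD i ' ' = '<' then arr.set (i+1) (arr.getD i 0 + 1) else arr

def stepBwdA (cs : List Char) (arr : List Int) (i : Nat) : List Int :=
  if cs.getD i ' ' = '>' then arr.set i (max (arr.getD (i+1) 0 + 1) (arr.getD i 0)) else arr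

def goodson (s : String) : Int :=
  let cs := s.toList
  let n := cs.length
  let arr : List Int := List.replicate (n+1) 0      -- [0]*(n+1)
  let arr := (List.range n).foldl (stepFwdA cs) arr         -- for i in range(n)
  let arr := ((List.range n).reverse).foldl (stepBwdA cs) arr   -- for i in reversed(range(n))
  arr.sum                                            -- sum(arr)

-- ===== PORT B =====
-- B-side helpers: a*(a-1)//2 + b*(b-1)//2 + max(a,b) (Python // = floordiv), and the loop body.
def triB (x : Int) : Int := PySem.Int.floordiv (x * (x - 1)) 2
def closeB (a b : Int) : Int := triB a + triB b + max a b

def stepB (st : Int × Int × Int) (c : Char) : Int × Int × Int :=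
  let (t, a, b) := st
  if c = '<' then
    (if b ≠ 0 then (t + closeB a b, 1, 0) else (t, a + 1, b))
  else if c = '>' then (t, a, b + 1)
  else (t + closeB a b, 0, 0)

def goodson_alt (s : String) : Int :=
  let st := s.toList.foldl stepB (0, 0, 0)
  st.1 + closeB st.2.1 st.2.2

-- ===== PRECONDITION & SPEC =====
def Spec_goodson (s : String) (out : Int) : Prop := out = goodson_alt s
instance (s : String) (out : Int) : Decidable (Spec_goodson s out) := by unfold Spec_goodson; infer_instance

-- ===== CLAIM (what is proved, stated in full; the proofs are below) =====
def Claim_equal_goodson : Prop := ∀ (s : String), Dom_goodson s → Spec_goodson s (goodson s)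

-- ===== LEMMAS AND PROOFS =====

-- run of '>' at the head
def rC : List Char → Int
  | [] => 0
  | c :: t => if c = '>' then rC t + 1 else 0

-- W a cs = sum of candy values over the boundary positions of cs, with pending ascent a on the left
def WC : Int → List Char → Int
  | a, [] => max a 0
  | a, c :: t => max a (rC (c :: t)) + (if c = '<' then WC (a+1) t else WC 0 t)

-- recursive form of B's loop: pending ascent a, pending descent b
def GC : Int → Int → List Char → Int
  | a, b, [] => closeB a b
  | a, b, c :: t =>
    if c = '<' then (if b ≠ 0 then closeB a b + GC 1 0 t else GC (a+1) 0 t)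
    else if c = '>' then GC a (b+1) t
    else closeB a b + GC 0 0 t

-- index functions describing A's array: L-values after the forward pass, R-run, final values
def LfI (cs : List Char) : Nat → Int
  | 0 => 0
  | j+1 => if cs.getD j ' ' = '<' then LfI cs j + 1 else 0

def RfI (cs : List Char) (j : Nat) : Int :=
  if h : j < cs.length then (if cs.getD j ' ' = '>' then RfI cs (j+1) + 1 else 0) else 0
termination_by cs.length - j

def FfI (cs : List Char) (j : Nat) : Int :=
  if h : j < cs.length then
    (if cs.getD j ' ' = '>' then max (FfI cs (j+1) + 1) (LfI cs j) else LfI cs j)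
  else LfI cs j
termination_by cs.length - j

lemma two_mul_triB (x : Int) : 2 * triB x = x * (x - 1) := by
  have hd : (2 : Int) ∣ x * (x - 1) := by
    have h : Even ((x - 1) * ((x - 1) + 1)) := Int.even_mul_succ_self (x - 1)
    have : Even (x * (x - 1)) := by
      have hx : (x - 1) * ((x - 1) + 1) = x * (x - 1) := by ring
      rwa [hx] at h
    exact this.two_dvd
  rw [triB, PySem.Int.floordiv_eq_ediv_of_pos (by norm_num)]
  exact Int.mul_ediv_cancel' hd

lemma triB_succ (a : Int) : triB (a + 1) = triB a + a := by
  have h1 := two_mul_triB (a + 1)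
  have h2 := two_mul_triB a
  nlinarith [h1, h2]

lemma triB_zero : triB 0 = 0 := by decide

lemma triB_one : triB 1 = 0 := by decide

lemma rC_nonneg (cs : List Char) : 0 ≤ rC cs := by
  induction cs with
  | nil => simp [rC]
  | cons c t ih => by_cases h : c = '>' <;> simp [rC, h] <;> omega

lemma LfI_nonneg (cs : List Char) (j : Nat) : 0 ≤ LfI cs j := by
  induction j with
  | zero => simp [LfI]
  | succ j ih => by_cases h : cs.getD j ' ' = '<' <;> simp [LfI, h] <;> omega

lemma RfI_nonneg (cs : List Char) (j : Nat) : 0 ≤ RfI cs j := by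
  fun_induction RfI cs j with
  | case1 j h hc ih => omega
  | case2 j h hc => omega
  | case3 j h => omega

-- B's fold equals GC
lemma fold_stepB (cs : List Char) : ∀ (t a b : Int),
    (cs.foldl stepB (t, a, b)).1 + closeB (cs.foldl stepB (t, a, b)).2.1 (cs.foldl stepB (t, a, b)).2.2
      = t + GC a b cs := by
  induction cs with
  | nil => intro t a b; simp [GC]
  | cons c cs ih =>
    intro t a b
    by_cases h1 : c = '<'
    · by_cases h2 : b = 0
      · simp [stepB, GC, h1, h2, ih]
      · simp [stepB, GC, h1, h2, ih]; ring
    · by_cases h3 : c = '>'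
      · simp [stepB, GC, h1, h3, ih]
      · simp [stepB, GC, h1, h3, ih]; ring

-- the key arithmetic bridge between GC and WC
lemma GW (cs : List Char) : ∀ (a b : Int), 0 ≤ a → 0 ≤ b →
    GC a b cs = if b = 0 then triB a + WC a cs
      else triB a + max a (b + rC cs) + (b - 1) * (b + rC cs) - triB b + WC 0 cs := by
  induction cs with
  | nil =>
    intro a b ha hb
    by_cases h2 : b = 0
    · simp [GC, WC, h2, closeB, triB_zero]
    · simp [GC, WC, h2, closeB, rC]
      nlinarith [two_mul_triB b]
  | cons c t ih =>
    intro a b ha hb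
    by_cases h1 : c = '<'
    · subst h1
      have hr : rC ('<' :: t) = 0 := by simp [rC]
      have hw : WC a ('<' :: t) = max a 0 + WC (a+1) t := by simp [WC, hr]
      by_cases h2 : b = 0
      · subst h2
        have hg : GC a 0 ('<' :: t) = GC (a+1) 0 t := by simp [GC]
        rw [hg, ih (a+1) 0 (by omega) le_rfl, if_pos rfl, if_pos rfl, hw,
          max_eq_left ha, triB_succ]
        ring
      · have hg : GC a b ('<' :: t) = closeB a b + GC 1 0 t := by simp [GC, h2]
        have hw0 : WC 0 ('<' :: t) = max 0 0 + WC 1 t := by simp [WC, hr]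
        rw [hg, ih 1 0 (by omega) le_rfl, if_pos rfl, if_neg h2, hw0, hr, closeB, triB_one]
        simp only [add_zero, max_self]
        nlinarith [two_mul_triB b]
    · by_cases h3 : c = '>'
      · subst h3
        have hrt := rC_nonneg t
        have hr : rC ('>' :: t) = rC t + 1 := by simp [rC]
        have hg : GC a b ('>' :: t) = GC a (b+1) t := by simp [GC, h1]
        have hbn : ¬ (b + 1 = 0) := by omega
        have hw0 : WC 0 ('>' :: t) = (rC t + 1) + WC 0 t := by
          simp [WC, hr, max_eq_right (by omega : (0:Int) ≤ rC t + 1)]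
        rw [hg, ih a (b+1) ha (by omega), if_neg hbn]
        by_cases h2 : b = 0
        · subst h2
          have hwa : WC a ('>' :: t) = max a (rC t + 1) + WC 0 t := by simp [WC, hr]
          rw [if_pos rfl, hwa]
          ring_nf
          simp [triB_zero, triB_one]
          try ring
        · rw [if_neg h2, hw0, hr]
          have hm : b + (rC t + 1) = b + 1 + rC t := by ring
          rw [hm]
          nlinarith [two_mul_triB b, two_mul_triB (b+1)]
      · have hr : rC (c :: t) = 0 := by simp [rC, h3]
        have hg : GC a b (c :: t) = closeB a b + GC 0 0 t := by simp [GC, h1, h3]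
        have hwa : WC a (c :: t) = max a 0 + WC 0 t := by simp [WC, hr, h1]
        have hw0 : WC 0 (c :: t) = max 0 0 + WC 0 t := by simp [WC, hr, h1]
        rw [hg, ih 0 0 le_rfl le_rfl, if_pos rfl]
        by_cases h2 : b = 0
        · subst h2
          rw [if_pos rfl, hwa, closeB, triB_zero]
          simp [max_eq_left ha]
          ring
        · rw [if_neg h2, hw0, hr, closeB, triB_zero]
          simp only [add_zero, max_self]
          nlinarith [two_mul_triB b]

-- A-side characterisations
lemma getD_set_int (l : List Int) (i j : Nat) (v : Int) :
    (l.set i v).getD j 0 = if i = j ∧ i < l.length then v else l.getD j 0 := by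
  simp only [List.getD_eq_getElem?_getD, List.getElem?_set]
  split_ifs with h1 h2 h3 <;> simp_all <;> omega

lemma getD_replicate_zero (m j : Nat) : (List.replicate m (0:Int)).getD j 0 = 0 := by
  simp only [List.getD_eq_getElem?_getD, List.getElem?_replicate]
  split_ifs <;> rfl

lemma LfI_succ_lt (cs : List Char) (j : Nat) (h : cs.getD j ' ' = '<') :
    LfI cs (j+1) = LfI cs j + 1 := by
  rw [show LfI cs (j+1) = if cs.getD j ' ' = '<' then LfI cs j + 1 else 0 from rfl, if_pos h]

lemma LfI_succ_not (cs : List Char) (j : Nat) (h : ¬ cs.getD j ' ' = '<') :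
    LfI cs (j+1) = 0 := by
  rw [show LfI cs (j+1) = if cs.getD j ' ' = '<' then LfI cs j + 1 else 0 from rfl, if_neg h]

lemma fwd_inv (cs : List Char) (k : Nat) (hk : k ≤ cs.length) :
    ((List.range k).foldl (stepFwdA cs) (List.replicate (cs.length+1) 0)).length = cs.length + 1 ∧
    ∀ j ≤ cs.length,
      ((List.range k).foldl (stepFwdA cs) (List.replicate (cs.length+1) 0)).getD j 0
        = if j ≤ k then LfI cs j else 0 := by
  induction k with
  | zero =>
    refine ⟨by simp, ?_⟩
    intro j hj
    simp only [List.range_zero, List.foldl_nil, getD_replicate_zero]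
    split_ifs with h
    · interval_cases j; simp [LfI]
    · rfl
  | succ k ih =>
    obtain ⟨hl, hv⟩ := ih (by omega)
    rw [List.range_succ, List.foldl_append, List.foldl_cons, List.foldl_nil, stepFwdA]
    by_cases hc : cs.getD k ' ' = '<'
    · rw [if_pos hc]
      refine ⟨by simpa using hl, ?_⟩
      intro j hj
      rw [getD_set_int, hl, hv j hj]
      have hkv : ((List.range k).foldl (stepFwdA cs) (List.replicate (cs.length+1) 0)).getD k 0
          = LfI cs k := by rw [hv k (by omega)]; simp
      rw [hkv]
      by_cases hj1 : j = k + 1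
      · subst hj1
        rw [if_pos ⟨rfl, by omega⟩, if_pos (by omega), LfI_succ_lt cs k hc]
      · rw [if_neg (fun h => hj1 h.1.symm)]
        split_ifs <;> first | rfl | omega
    · rw [if_neg hc]
      refine ⟨hl, ?_⟩
      intro j hj
      rw [hv j hj]
      by_cases hj1 : j = k + 1
      · subst hj1
        rw [if_neg (by omega), if_pos (by omega)]
        exact (LfI_succ_not cs k hc).symm
      · split_ifs <;> first | rfl | omega

lemma FfI_gt (cs : List Char) (j : Nat) (h : j < cs.length) (hc : cs.getD j ' ' = '>') :
    FfI cs j = max (FfI cs (j+1) + 1) (LfI cs j) := by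
  rw [FfI, dif_pos h, if_pos hc]

lemma FfI_not (cs : List Char) (j : Nat) (h : ¬ (j < cs.length ∧ cs.getD j ' ' = '>')) :
    FfI cs j = LfI cs j := by
  rw [FfI]
  split_ifs with h1 h2
  · exact absurd ⟨h1, h2⟩ h
  · rfl
  · rfl

lemma bwd_inv (cs : List Char) : ∀ (k : Nat), k ≤ cs.length → ∀ (arr : List Int),
    arr.length = cs.length + 1 →
    (∀ j ≤ cs.length, arr.getD j 0 = if j < k then LfI cs j else FfI cs j) →
    (((List.range k).reverse).foldl (stepBwdA cs) arr).length = cs.length + 1 ∧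
    ∀ j ≤ cs.length, (((List.range k).reverse).foldl (stepBwdA cs) arr).getD j 0 = FfI cs j := by
  intro k
  induction k with
  | zero =>
    intro _ arr hlen hv
    refine ⟨by simpa using hlen, ?_⟩
    intro j hj
    simpa using (hv j hj).trans (by rw [if_neg (by omega)])
  | succ k ih =>
    intro hk arr hlen hv
    have hkn : k < cs.length := by omega
    rw [List.range_succ, List.reverse_append, List.reverse_singleton, List.singleton_append,
      List.foldl_cons, stepBwdA]
    have hvk : arr.getD k 0 = LfI cs k := by rw [hv k (by omega), if_pos (by omega)]
    have hvk1 : arr.getD (k+1) 0 = FfI cs (k+1) := by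
      rw [hv (k+1) (by omega), if_neg (by omega)]
    by_cases hc : cs.getD k ' ' = '>'
    · rw [if_pos hc]
      refine ih (by omega) _ (by simpa using hlen) ?_
      intro j hj
      rw [getD_set_int, hlen, hvk, hvk1]
      by_cases hj1 : j = k
      · subst hj1
        rw [if_pos ⟨rfl, by omega⟩, if_neg (by omega)]
        conv_rhs => rw [FfI_gt _ _ hkn hc]
      · rw [if_neg (fun h => hj1 h.1.symm), hv j hj]
        split_ifs <;> first | rfl | omega
    · rw [if_neg hc]
      refine ih (by omega) _ hlen ?_
      intro j hj
      rw [hv j hj]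
      by_cases hj1 : j = k
      · subst hj1
        rw [if_pos (by omega), if_neg (by omega)]
        conv_rhs => rw [FfI_not _ _ (fun hh => hc hh.2)]
      · split_ifs <;> first | rfl | omega

lemma FfI_eq_max (cs : List Char) (j : Nat) : FfI cs j = max (LfI cs j) (RfI cs j) := by
  fun_induction FfI cs j with
  | case1 j h hc ih =>
    have hR : RfI cs j = RfI cs (j+1) + 1 := by rw [RfI, dif_pos h, if_pos hc]
    have hL1 : LfI cs (j+1) = 0 := LfI_succ_not cs j (by rw [hc]; decide)
    have hR1 := RfI_nonneg cs (j+1)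
    rw [hL1] at ih
    rw [hR, ih]
    omega
  | case2 j h hc =>
    have hR : RfI cs j = 0 := by rw [RfI, dif_pos h, if_neg hc]
    have := LfI_nonneg cs j
    rw [hR]
    omega
  | case3 j h =>
    have hR : RfI cs j = 0 := by rw [RfI, dif_neg h]
    have := LfI_nonneg cs j
    rw [hR]
    omega

lemma RfI_eq_rC_drop (cs : List Char) (k : Nat) : RfI cs k = rC (cs.drop k) := by
  fun_induction RfI cs k with
  | case1 j h hc ih =>
    rw [List.drop_eq_getElem_cons h, rC]
    have : cs[j] = '>' := by
      have : cs.getD j ' ' = cs[j] := List.getD_eq_getElem cs ' ' h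
      rw [← this, hc]
    rw [if_pos this, ← ih]
  | case2 j h hc =>
    rw [List.drop_eq_getElem_cons h, rC]
    have hg : cs.getD j ' ' = cs[j] := List.getD_eq_getElem cs ' ' h
    rw [if_neg (by rw [← hg]; exact hc)]
  | case3 j h =>
    rw [List.drop_eq_nil_of_le (by omega), rC]

lemma sumW (cs : List Char) : ∀ (m k : Nat), k + m = cs.length →
    ((List.range' k (m+1)).map (fun j => max (LfI cs j) (RfI cs j))).sum
      = WC (LfI cs k) (cs.drop k) := by
  intro m
  induction m with
  | zero =>
    intro k h
    have hR : RfI cs k = 0 := by rw [RfI, dif_neg (by omega)]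
    rw [List.range'_one, List.drop_eq_nil_of_le (by omega)]
    simp [WC, hR]
  | succ m ih =>
    intro k h
    have hk : k < cs.length := by omega
    have hdrop : cs.drop k = cs[k] :: cs.drop (k+1) := List.drop_eq_getElem_cons hk
    have hg : cs.getD k ' ' = cs[k] := List.getD_eq_getElem cs ' ' hk
    have hr : rC (cs.drop k) = RfI cs k := (RfI_eq_rC_drop cs k).symm
    rw [List.range'_succ, List.map_cons, List.sum_cons, hdrop, WC, ← hdrop, hr]
    by_cases hc : cs[k] = '<'
    · rw [if_pos hc, show LfI cs k + 1 = LfI cs (k+1) from (LfI_succ_lt cs k (by rw [hg, hc])).symm,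
        ih (k+1) (by omega)]
    · rw [if_neg hc, show (0:Int) = LfI cs (k+1) from (LfI_succ_not cs k (by rw [hg]; exact hc)).symm,
        ih (k+1) (by omega)]

lemma goodson_eq_WC (s : String) : goodson s = WC 0 s.toList := by
  obtain ⟨hl1, hv1⟩ := fwd_inv s.toList s.toList.length le_rfl
  obtain ⟨hl2, hv2⟩ := bwd_inv s.toList s.toList.length le_rfl _ hl1 (by
    intro j hj
    rw [hv1 j hj, if_pos hj]
    split_ifs with h
    · rfl
    · have hj' : j = s.toList.length := by omega
      subst hj'
      exact (FfI_not _ _ (fun hh => absurd hh.1 (lt_irrefl _))).symm)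
  have harr : ((List.range s.toList.length).reverse).foldl (stepBwdA s.toList)
        ((List.range s.toList.length).foldl (stepFwdA s.toList)
          (List.replicate (s.toList.length+1) 0))
      = (List.range (s.toList.length+1)).map (fun j => FfI s.toList j) := by
    apply List.ext_getElem
    · rw [hl2]; simp
    · intro i hi1 hi2
      have hi : i ≤ s.toList.length := by simp at hi2; omega
      have := hv2 i hi
      rw [List.getD_eq_getElem _ _ (by omega)] at this
      simpa using this
  show (((List.range s.toList.length).reverse).foldl (stepBwdA s.toList)
      ((List.range s.toList.length).foldl (stepFwdA s.toList)
        (List.replicate (s.toList.length+1) 0))).sum = WC 0 s.toList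
  rw [harr]
  have hmap : (List.range (s.toList.length+1)).map (fun j => FfI s.toList j)
      = (List.range (s.toList.length+1)).map (fun j => max (LfI s.toList j) (RfI s.toList j)) := by
    exact List.map_congr_left (fun a _ => FfI_eq_max s.toList a)
  rw [hmap, List.range_eq_range']
  have := sumW s.toList s.toList.length 0 (by omega)
  simpa using this

-- ===== VERDICT (by name: the statement is the Claim_ definition above) =====
theorem goodson_spec : Claim_equal_goodson := by
  intro s _
  unfold Spec_goodson
  have hB : goodson_alt s = GC 0 0 s.toList := by
    unfold goodson_alt
    simpa using fold_stepB s.toList 0 0 0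
  have hG : GC 0 0 s.toList = WC 0 s.toList := by
    have := GW s.toList 0 0 le_rfl le_rfl
    simpa [triB, PySem.Int.floordiv] using this
  rw [hB, hG, goodson_eq_WC]
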